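-- pv_equiv track=rewrite | github.com/avcopan/array-permutation-operator | attic/operator.py | process_axis_string
-- ===== SOURCE A (Python) =====
-- def process_axis_string(axis_string):
--   try:
--     axis_equivalent_sets = [[int(axis) for axis in substring.split(',')] for substring in axis_string.split('/')]
--     items = tuple(sum(axis_equivalent_sets, []))
--     composition = tuple(len(axis_equivalent_set) for axis_equivalent_set in axis_equivalent_sets)
--     return items, composition
--   except:
--     raise Exception("Invalid string {:s} passed as constructor argument.".format(axis_string))
-- ===== SOURCE B (Python) =====
-- def process_axis_string(axis_string):
--   try:
--     items = []
--     composition = []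
--     buf = []
--     count = 0
--     for ch in axis_string + '/':
--       if ch == ',':
--         items.append(int(''.join(buf)))
--         buf = []
--         count += 1
--       elif ch == '/':
--         items.append(int(''.join(buf)))
--         buf = []
--         composition.append(count + 1)
--         count = 0
--       else:
--         buf.append(ch)
--     return tuple(items), tuple(composition)
--   except:
--     raise Exception("Invalid string {:s} passed as constructor argument.".format(axis_string))
-- ===== Notes on version B (the rewrite author's own statement) =====
-- stated objective: alternative
-- what changed: Replaces A's split('/')/split(',') nested comprehensions plus sum-flatten and lengths passes with a single character-level state machine over axis_string+'/' that keeps a token buffer and a per-group counter, emitting each parsed int and group length at the delimiters; no split calls or intermediate list-of-lists at all.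
import Mathlib
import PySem

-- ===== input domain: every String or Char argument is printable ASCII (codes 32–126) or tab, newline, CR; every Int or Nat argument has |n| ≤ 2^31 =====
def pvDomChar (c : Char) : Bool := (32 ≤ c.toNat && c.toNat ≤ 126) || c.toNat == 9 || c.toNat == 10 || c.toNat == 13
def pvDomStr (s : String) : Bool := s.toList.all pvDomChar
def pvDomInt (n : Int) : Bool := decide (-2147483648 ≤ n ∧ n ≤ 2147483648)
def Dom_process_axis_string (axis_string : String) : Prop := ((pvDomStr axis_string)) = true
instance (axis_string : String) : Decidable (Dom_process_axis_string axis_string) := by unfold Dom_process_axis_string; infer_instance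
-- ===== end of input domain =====

-- B replaces A's split('/')/split(',') comprehensions + sum-flatten + lengths pass with ONE
-- character-level state-machine pass over axis_string+'/' (token buffer + per-group counter);
-- return values proved equal on Pre_ (A raises Exception exactly where some token is not int()-parsable).

-- ===== PORT A =====
-- the separators "/" and "," are nonempty literals, so Str.split? is always `some`; `.getD []` is unreachable
def pa_parseAll (subs : List String) : Option (List (List Int)) :=
  subs.mapM (fun sub => ((PySem.Str.split? sub ",").getD []).mapM PySem.Int.ofStr?)

def process_axis_string (axis_string : String) : List Int × List Int :=
  match pa_parseAll ((PySem.Str.split? axis_string "/").getD []) with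
  | some sets => (sets.flatten, sets.map (fun l => (l.length : Int)))
  | none => ([], [])   -- unreachable under Pre_: Python raises here

-- ===== PORT B =====
-- the loop 'for ch in axis_string + "/": …' with state (items, composition, buf, count);
-- int(''.join(buf)) is PySem.Int.ofChars? buf; none = the ValueError on which Python raises
def pb_scan (cs : List Char) (items comp : List Int) (buf : List Char) (count : Int) :
    Option (List Int × List Int) :=
  match cs with
  | [] => some (items, comp)
  | ch :: rest =>
    if ch = ',' then
      match PySem.Int.ofChars? buf with
      | some v => pb_scan rest (items ++ [v]) comp [] (count + 1)
      | none => none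
    else if ch = '/' then
      match PySem.Int.ofChars? buf with
      | some v => pb_scan rest (items ++ [v]) (comp ++ [count + 1]) [] 0
      | none => none
    else pb_scan rest items comp (buf ++ [ch]) count

def process_axis_string_alt (axis_string : String) : List Int × List Int :=
  (pb_scan (axis_string.toList ++ ['/']) [] [] [] 0).getD ([], [])   -- default unreachable under Pre_

-- ===== PRECONDITION & SPEC =====
-- Pre_: every comma-separated piece of every '/'-segment parses as a Python int (else A raises Exception)
def Pre_process_axis_string (axis_string : String) : Prop :=
  ∀ sub ∈ (PySem.Str.split? axis_string "/").getD [],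
    ∀ a ∈ (PySem.Str.split? sub ",").getD [], (PySem.Int.ofStr? a).isSome = true
instance (axis_string : String) : Decidable (Pre_process_axis_string axis_string) := by
  unfold Pre_process_axis_string; infer_instance

def pvWitness_process_axis_string : String := "0,1/2"

def Spec_process_axis_string (axis_string : String) (out : List Int × List Int) : Prop := out = process_axis_string_alt axis_string
instance (axis_string : String) (out : List Int × List Int) : Decidable (Spec_process_axis_string axis_string out) := by unfold Spec_process_axis_string; infer_instance

-- ===== CLAIM (what is proved, stated in full; the proofs are below) =====
def Claim_equal_process_axis_string : Prop := ∀ (axis_string : String), Dom_process_axis_string axis_string → Pre_process_axis_string axis_string → Spec_process_axis_string axis_string (process_axis_string axis_string)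

-- ===== LEMMAS AND PROOFS =====

theorem pvWitness_ok : Dom_process_axis_string pvWitness_process_axis_string ∧
    Pre_process_axis_string pvWitness_process_axis_string := by decide

-- splitting a char list at a delimiter, carrying the current segment's prefix (spec helper)
def segs (d : Char) : List Char → List Char → List (List Char)
  | [], cur => [cur]
  | c :: rest, cur => if c = d then cur :: segs d rest [] else segs d rest (cur ++ [c])

theorem segs_no_delim (d : Char) : ∀ (l cur : List Char), d ∉ l → segs d l cur = [cur ++ l] := by
  intro l
  induction l with
  | nil => intro cur _; simp [segs]
  | cons c rest ih =>
    intro cur h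
    have hc : c ≠ d := fun he => h (by simp [he])
    simp only [segs, if_neg hc]
    rw [ih _ (fun hm => h (by simp [hm]))]
    simp

theorem segs_token (d : Char) : ∀ (pre : List Char), d ∉ pre → ∀ (l cur : List Char),
    segs d (pre ++ d :: l) cur = (cur ++ pre) :: segs d l [] := by
  intro pre
  induction pre with
  | nil => intro _ l cur; simp [segs]
  | cons b bs ih =>
    intro h l cur
    have hb : b ≠ d := fun he => h (by simp [he])
    simp only [List.cons_append, segs, if_neg hb]
    rw [ih (fun hm => h (by simp [hm]))]
    simp

theorem segs_shift (d : Char) : ∀ (cs : List Char), ∃ t ts, segs d cs [] = t :: ts ∧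
    ∀ cur, segs d cs cur = (cur ++ t) :: ts := by
  intro cs
  induction cs with
  | nil => exact ⟨[], [], rfl, fun cur => by simp [segs]⟩
  | cons c rest ih =>
    by_cases hc : c = d
    · exact ⟨[], segs d rest [], by simp [segs, hc], fun cur => by simp [segs, hc]⟩
    · obtain ⟨t, ts, h0, hcur⟩ := ih
      refine ⟨[c] ++ t, ts, ?_, ?_⟩
      · simp only [segs, if_neg hc]
        rw [show ([] : List Char) ++ [c] = [c] from rfl, hcur [c]]
      · intro cur
        simp only [segs, if_neg hc]
        rw [hcur (cur ++ [c])]; simp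

-- PySem's splitOn with a one-character separator is `segs`
theorem go_eq_segs (d : Char) : ∀ (fuel : Nat) (l cur : List Char) (accs : List (List Char)),
    l.length ≤ fuel →
    PySem.Chars.splitOn.go [d] fuel l cur accs = accs.reverse ++ segs d l cur.reverse := by
  intro fuel
  induction fuel with
  | zero =>
    intro l cur accs h
    have : l = [] := List.eq_nil_of_length_eq_zero (by omega)
    subst this
    simp [PySem.Chars.splitOn.go, segs]
  | succ f ih =>
    intro l cur accs h
    match l with
    | [] => simp [PySem.Chars.splitOn.go, segs]
    | c :: rest =>
      by_cases hc : d = c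
      · subst hc
        have hpre : [d].isPrefixOf (d :: rest) = true := by simp [List.isPrefixOf]
        simp only [PySem.Chars.splitOn.go, hpre, if_pos, List.length_cons,
          List.length_nil, List.drop_succ_cons, List.drop_zero]
        rw [ih rest [] (cur.reverse :: accs) (by simp at h ⊢; omega)]
        simp [segs]
      · have hpre : [d].isPrefixOf (c :: rest) = false := by
          simp [List.isPrefixOf]; exact fun he => hc he
        simp only [PySem.Chars.splitOn.go, hpre, Bool.false_eq_true, if_false]
        rw [ih rest (c :: cur) accs (by simp at h ⊢; omega)]
        have hcd : ¬ c = d := fun he => hc he.symm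
        simp [segs, hcd]

theorem splitOn_eq_segs (cs : List Char) (d : Char) :
    PySem.Chars.splitOn cs [d] = segs d cs [] := by
  unfold PySem.Chars.splitOn
  rw [go_eq_segs d (cs.length + 1) cs [] [] (by omega)]
  simp

-- all-parsable lists have a successful mapM
theorem mapM_isSome {α β : Type} (f : α → Option β) :
    ∀ (l : List α), (∀ x ∈ l, (f x).isSome = true) → ∃ ys, l.mapM f = some ys := by
  intro l
  induction l with
  | nil => intro _; exact ⟨[], rfl⟩
  | cons x xs ih =>
    intro h
    obtain ⟨y, hy⟩ := Option.isSome_iff_exists.mp (h x (by simp))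
    obtain ⟨ys, hys⟩ := ih (fun z hz => h z (by simp [hz]))
    exact ⟨y :: ys, by simp [List.mapM_cons, hy, hys]⟩

def addFirst (c : Int) : List Int → List Int
  | [] => []
  | x :: xs => (c + x) :: xs

theorem addFirst_zero : ∀ (xs : List Int), addFirst 0 xs = xs := by
  intro xs; cases xs <;> simp [addFirst]

def groupParse (g : List Char) : Option (List Int) :=
  (segs ',' g []).mapM PySem.Int.ofChars?

-- B's scan computes the group-structured parse (success case)
theorem scan_eq : ∀ (cs buf : List Char) (items comp : List Int) (count : Int)
    (sets : List (List Int)), (',' ∉ buf) →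
    (segs '/' cs buf).mapM groupParse = some sets →
    pb_scan (cs ++ ['/']) items comp buf count =
      some (items ++ sets.flatten, comp ++ addFirst count (sets.map (fun l => (l.length : Int)))) := by
  intro cs
  induction cs with
  | nil =>
    intro buf items comp count sets hbuf hsets
    simp only [segs, List.mapM_cons, List.mapM_nil, groupParse] at hsets
    rw [segs_no_delim ',' buf [] hbuf] at hsets
    simp only [List.nil_append, List.mapM_cons, List.mapM_nil, Option.pure_def,
      Option.bind_eq_bind, Option.bind_eq_some_iff, Option.some.injEq] at hsets
    obtain ⟨g, hg, w, rfl, rfl⟩ := hsets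
    obtain ⟨a, ha, w', rfl, rfl⟩ := hg
    simp [pb_scan, ha, addFirst]
  | cons c rest ih =>
    intro buf items comp count sets hbuf hsets
    by_cases hc : c = ','
    · subst hc
      have hne : (',' : Char) ≠ '/' := by decide
      simp only [segs, if_neg hne] at hsets
      obtain ⟨t, ts, h0, hcur⟩ := segs_shift '/' rest
      rw [hcur (buf ++ [','])] at hsets
      have htok : segs ',' (buf ++ [','] ++ t) [] = buf :: segs ',' t [] := by
        rw [List.append_assoc, List.singleton_append, segs_token ',' buf hbuf t []]
        simp
      simp only [List.mapM_cons, groupParse, htok, Option.pure_def, Option.bind_eq_bind,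
        Option.bind_eq_some_iff, Option.some.injEq] at hsets
      obtain ⟨g, ⟨v, hv, g0, hg0, rfl⟩, restSets, hrest, rfl⟩ := hsets
      have hIH : (segs '/' rest []).mapM groupParse = some (g0 :: restSets) := by
        rw [h0]
        simp [List.mapM_cons, groupParse, hg0, hrest]
      have := ih [] (items ++ [v]) comp (count + 1) (g0 :: restSets) (by simp) hIH
      simp only [List.cons_append, pb_scan, hv, this, if_true,
        Option.some.injEq, Prod.mk.injEq]
      constructor
      · simp
      · simp only [List.map_cons, addFirst, List.length_cons]
        congr 2
        push_cast; ring
    · by_cases hs : c = '/'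
      · subst hs
        rw [show segs '/' ('/' :: rest) buf = buf :: segs '/' rest [] from by simp [segs]] at hsets
        simp only [List.mapM_cons, groupParse, Option.pure_def, Option.bind_eq_bind,
          Option.bind_eq_some_iff, Option.some.injEq] at hsets
        obtain ⟨g, hg, restSets, hrest, rfl⟩ := hsets
        rw [segs_no_delim ',' buf [] hbuf] at hg
        simp only [List.nil_append, List.mapM_cons, List.mapM_nil, Option.pure_def,
          Option.bind_eq_bind, Option.bind_eq_some_iff, Option.some.injEq] at hg
        obtain ⟨v, hv, w, rfl, rfl⟩ := hg
        have := ih [] (items ++ [v]) (comp ++ [count + 1]) 0 restSets (by simp) hrest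
        simp only [List.cons_append, pb_scan, if_neg (by decide : ¬('/' : Char) = ','),
          hv, this, if_true, Option.some.injEq, Prod.mk.injEq]
        constructor
        · simp
        · rw [addFirst_zero]
          simp [addFirst]
      · simp only [segs, if_neg hs] at hsets
        have hbuf' : ',' ∉ buf ++ [c] := by
          intro hm
          rcases List.mem_append.mp hm with h | h
          · exact hbuf h
          · simp at h; exact hc h.symm
        have := ih (buf ++ [c]) items comp count sets hbuf' hsets
        simp only [List.cons_append, pb_scan, if_neg hc, if_neg hs, this]

-- A's computation in terms of segs
theorem pa_eq (s : String) :
    pa_parseAll ((PySem.Str.split? s "/").getD []) = (segs '/' s.toList []).mapM groupParse := by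
  have hsl : ("/" : String).toList = ['/'] := by decide
  have hcm : ("," : String).toList = [','] := by decide
  unfold pa_parseAll
  rw [show (PySem.Str.split? s "/").getD [] = (segs '/' s.toList []).map String.ofList from by
    simp [PySem.Str.split?, PySem.Chars.split?, hsl, splitOn_eq_segs]]
  rw [List.mapM_map]
  congr 1
  funext g
  simp only [Function.comp]
  rw [show (PySem.Str.split? (String.ofList g) ",").getD [] = (segs ',' g []).map String.ofList from by
    simp [PySem.Str.split?, PySem.Chars.split?, hcm, splitOn_eq_segs]]
  rw [List.mapM_map]
  unfold groupParse
  congr 1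
  funext t
  simp [Function.comp, PySem.Int.ofStr?]

-- ===== VERDICT (by name: the statement is the Claim_ definition above) =====
theorem process_axis_string_spec : Claim_equal_process_axis_string := by
  intro s _ hpre
  unfold Spec_process_axis_string process_axis_string process_axis_string_alt
  have hex : ∃ sets, (segs '/' s.toList []).mapM groupParse = some sets := by
    rw [← pa_eq]
    apply mapM_isSome
    intro sub hsub
    obtain ⟨vs, hvs⟩ := mapM_isSome PySem.Int.ofStr? _ (hpre sub hsub)
    simp [hvs]
  obtain ⟨sets, hsets⟩ := hex
  rw [pa_eq, hsets, scan_eq s.toList [] [] [] 0 sets (by simp) hsets]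
  simp [addFirst_zero]
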